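/-
  MACHINE-WORD FACTS THE PROOFS OF heap.c's FUNCTIONS SHARE (agent GA proved each next to the first unit that needed it:
  Asan/HeapTest/{LiveSize,Malloc,Calloc}.lean; several units cite each, so they live in the shared package once).
  Program-independent and image-independent: plain arithmetic on 64-bit words and on numbers.

      ofNat_toNat_sub        `UInt64.ofNat (w.toNat - k) = w - UInt64.ofNat k`: the address the stepper writes for `[reg - k]`
      part8_and15            `test dil, 15`: the low byte masked with 15 is the word modulo 16
      r16_word               `lea r, [w + 15] ; and r, -16` computes `r16 w` (Asan/Heap.lean)
      mul_gt_of_factor_gt    a product of two positive numbers, one of which exceeds `R`, exceeds `R`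
      mul_small              the product of two numbers that `heap_product_ok` accepts fits 64 bits
-/
import Asan.Heap
namespace ProgX.Spec
open X86 X86.User Asan

/-- A word minus a small number, as the address the stepper writes for `[reg - k]`. -/
theorem ofNat_toNat_sub (w : Word) (k : Nat) (hk : k ≤ w.toNat) : UInt64.ofNat (w.toNat - k) = w - UInt64.ofNat k := by
  have hw := w.toNat_lt
  apply UInt64.toNat_inj.mp
  have hle : (UInt64.ofNat k) ≤ w := by
    rw [UInt64.le_iff_toNat_le, UInt64.toNat_ofNat', Nat.mod_eq_of_lt (by omega)]
    exact hk
  rw [UInt64.toNat_sub_of_le _ _ hle, UInt64.toNat_ofNat', UInt64.toNat_ofNat', Nat.mod_eq_of_lt (by omega),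
    Nat.mod_eq_of_lt (by omega)]

/-- `test dil, 15`: the low byte of a word, masked with 15, is the word modulo 16. -/
theorem part8_and15 (w : Word) : (Word.part Width.w8 w &&& 15#8).toNat = w.toNat % 16 := by
  unfold Word.part
  simp only [Width.bits, BitVec.toNat_and, BitVec.toNat_setWidth, UInt64.toNat_toBitVec, BitVec.toNat_ofNat]
  have e : (15 : Nat) % 2 ^ 8 = 2 ^ 4 - 1 := by decide
  rw [e, Nat.and_two_pow_sub_one_eq_mod]
  omega

/-- **The machine's rounding** `lea r, [w + 15] ; and r, -16` on words. -/
theorem r16_word (w : Word) (h : w.toNat + 15 < 2 ^ 64) : (w + 15 &&& 18446744073709551600).toNat = r16 w.toNat := by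
  have e1 : (w + 15).toNat = w.toNat + 15 := by
    rw [UInt64.toNat_add]
    simp only [UInt64.reduceToNat]
    omega
  rw [UInt64.toNat_and, e1]
  simp only [UInt64.reduceToNat]
  exact r16_land w.toNat h

/-- A product of two positive numbers one of which exceeds `R` exceeds `R`. -/
theorem mul_gt_of_factor_gt {k s R : Nat} (hk : k ≠ 0) (hs : s ≠ 0) (h : R < k ∨ R < s) : R < k * s := by
  rcases h with h | h
  · have := Nat.mul_le_mul_left k (show 1 ≤ s by omega)
    omega
  · have := Nat.mul_le_mul_right s (show 1 ≤ k by omega)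
    omega

/-- The product of two numbers that `heap_product_ok` accepts does not wrap. -/
theorem mul_small {k s : Nat} (h : k = 0 ∨ s = 0 ∨ (k ≤ 0x3FFFE0 ∧ s ≤ 0x3FFFE0)) : k * s < 2 ^ 64 := by
  rcases h with h | h | ⟨h1, h2⟩
  · rw [h, Nat.zero_mul]
    decide
  · rw [h, Nat.mul_zero]
    decide
  · have := Nat.mul_le_mul h1 h2
    omega

end ProgX.Spec
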